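-- pv_equiv track=rewrite | github.com/marysiuniq/advent_of_code_2020 | 20/untitled2.py | find_matching_edges_straight
-- ===== SOURCE A (Python) =====
-- def find_matching_edges_straight(in_dictionary):
--     pairs = []
--     for key, value in sorted(in_dictionary.items()):
--         for key1, value1 in sorted(in_dictionary.items()):
--             if key1 > key:
--                 for edge in value:
--                     if key != key1 and edge in value1:
--                         pairs += [key, value.index(edge), key1, value1.index(edge)]
--         #del in_dictionary[key]
--     return pairs
-- ===== SOURCE B (Python) =====
-- def find_matching_edges_straight(in_dictionary):
--     items = sorted(in_dictionary.items())
--     # index every edge once: edge -> list of (key, first index in that key's list), keys ascending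
--     occ = {}
--     for key, value in items:
--         for edge in dict.fromkeys(value):
--             occ.setdefault(edge, []).append((key, value.index(edge)))
--     pairs = []
--     for key, value in items:
--         # run-length encode the edge list: duplicate edges yield identical quadruples,
--         # so a run of r equal edges contributes one chunk (quad * r)
--         runs = []
--         cur = None
--         cnt = 0
--         for edge in value:
--             if edge == cur:
--                 cnt += 1
--             else:
--                 if cnt:
--                     runs.append((cur, cnt))
--                 cur = edge
--                 cnt = 1
--         if cnt:
--             runs.append((cur, cnt))
--         # group this key's matches by partner key via the edge index (no pairwise edge scan)
--         groups = {}
--         for edge, r in runs: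
--             v = value.index(edge)
--             for key1, idx1 in occ.get(edge, []):
--                 if key1 > key:
--                     q = [key, v, key1, idx1] * r
--                     g = groups.get(key1)
--                     if g is None:
--                         groups[key1] = q
--                     else:
--                         g += q
--         for key1, _ in items:
--             if key1 > key:
--                 g = groups.get(key1)
--                 if g is not None:
--                     pairs += g
--     return pairs
-- ===== Notes on version B (the rewrite author's own statement) =====
-- stated objective: faster
-- what changed: B builds an edge->(key,first-index) dictionary in one pass, run-length-compresses each value list (a run of r equal edges contributes one chunk quad*r) and groups each key's matches by partner key via that index, instead of A's pairwise scan over all key pairs with per-edge membership and .index scans; intended as faster, measured 2.23x at n=1024 on a timing run's const family (both sides time out at n=4096, where the output itself is too large).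
import Mathlib
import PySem

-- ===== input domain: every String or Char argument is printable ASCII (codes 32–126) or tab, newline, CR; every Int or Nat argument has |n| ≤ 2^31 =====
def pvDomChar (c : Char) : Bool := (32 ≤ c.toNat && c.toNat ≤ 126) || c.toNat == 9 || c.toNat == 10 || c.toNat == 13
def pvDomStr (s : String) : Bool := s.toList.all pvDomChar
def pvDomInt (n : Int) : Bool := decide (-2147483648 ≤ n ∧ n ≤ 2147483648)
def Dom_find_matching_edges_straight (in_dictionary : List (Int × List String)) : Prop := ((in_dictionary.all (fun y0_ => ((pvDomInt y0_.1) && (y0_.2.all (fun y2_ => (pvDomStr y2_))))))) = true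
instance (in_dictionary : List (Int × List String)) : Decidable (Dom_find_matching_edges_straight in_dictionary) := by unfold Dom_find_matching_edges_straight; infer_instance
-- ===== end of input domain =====

-- B replaces A's pairwise scan over key pairs (with per-edge membership and index scans) by an
-- edge->(key,index) dictionary built in one pass, run-length-compressed edge lists (duplicate
-- edges contribute identical quadruples) and a per-key grouping of matches by partner key;
-- intended as faster (measured 2.23x at n=1024 on a timing run's const family).

-- shared input reading: the dict argument's items() sorted by key (dict keys are unique, so
-- Python's tuple sort never compares the value lists)
def pvItems (in_dictionary : List (Int × List String)) : List (Int × List String) :=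
  PySem.List.sorted (PySem.Dict.ofList in_dictionary).items (fun p => p.1) false

-- value.index(edge) — in both programs only called with edge ∈ value, so the .getD 0 default is never used
def pvIndex (v : List String) (e : String) : Int :=
  (((PySem.List.index? v e).getD 0 : Nat) : Int)

-- ===== PORT A =====
def find_matching_edges_straight (in_dictionary : List (Int × List String)) : List Int :=
  (pvItems in_dictionary).foldl (fun pairs kv =>
    (pvItems in_dictionary).foldl (fun pairs kv1 =>
      if kv1.1 > kv.1 then
        kv.2.foldl (fun pairs edge =>
          if kv.1 ≠ kv1.1 ∧ edge ∈ kv1.2 then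
            pairs ++ [kv.1, pvIndex kv.2 edge, kv1.1, pvIndex kv1.2 edge]
          else pairs) pairs
      else pairs) pairs) []

-- ===== PORT B =====
-- B's run-length pass over one value list: the loop body (cur/cnt state), the trailing
-- 'if cnt: runs.append((cur, cnt))' flush, and the loop itself
def pvRleStep (st : List (String × Int) × Option String × Int) (edge : String) :
    List (String × Int) × Option String × Int :=
  if st.2.1 == some edge then (st.1, st.2.1, st.2.2 + 1)
  else ((if st.2.2 ≠ 0 then st.1 ++ [((st.2.1).getD "", st.2.2)] else st.1), some edge, 1)

def pvFlush (st : List (String × Int) × Option String × Int) : List (String × Int) :=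
  if st.2.2 ≠ 0 then st.1 ++ [((st.2.1).getD "", st.2.2)] else st.1

def pvRuns (value : List String) : List (String × Int) :=
  pvFlush (value.foldl pvRleStep ([], none, 0))

def find_matching_edges_straight_alt (in_dictionary : List (Int × List String)) : List Int :=
  let items := pvItems in_dictionary
  -- occ: edge -> list of (key, first index of the edge in that key's value); dict.fromkeys = dedup
  let occ : PySem.Dict String (List (Int × Int)) :=
    items.foldl (fun occ kv =>
      (PySem.List.dedup kv.2).foldl (fun occ edge =>
        occ.modify edge [] (· ++ [(kv.1, pvIndex kv.2 edge)])) occ)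
      PySem.Dict.empty
  items.foldl (fun pairs kv =>
    let runs := pvRuns kv.2
    -- group this key's matches by partner key via the edge index; a run of r equal edges
    -- contributes one chunk q * r ('g = groups.get(key1); if g is None: … else: g += q')
    let groups : PySem.Dict Int (List Int) :=
      runs.foldl (fun g er =>
        let v := pvIndex kv.2 er.1
        (occ.getD er.1 []).foldl (fun g pr =>
          if pr.1 > kv.1 then
            let q := PySem.List.pyRepeat [kv.1, v, pr.1, pr.2] er.2
            match g.get? pr.1 with
            | none => g.insert pr.1 q
            | some gl => g.insert pr.1 (gl ++ q)
          else g) g)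
        PySem.Dict.empty
    items.foldl (fun pairs kv1 =>
      if kv1.1 > kv.1 then
        match groups.get? kv1.1 with
        | none => pairs
        | some gl => pairs ++ gl
      else pairs) pairs) []

-- ===== PRECONDITION & SPEC =====
def Spec_find_matching_edges_straight (in_dictionary : List (Int × List String)) (out : List Int) : Prop := out = find_matching_edges_straight_alt in_dictionary
instance (in_dictionary : List (Int × List String)) (out : List Int) : Decidable (Spec_find_matching_edges_straight in_dictionary out) := by unfold Spec_find_matching_edges_straight; infer_instance

-- ===== CLAIM (what is proved, stated in full; the proofs are below) =====
def Claim_equal_find_matching_edges_straight : Prop := ∀ (in_dictionary : List (Int × List String)), Dom_find_matching_edges_straight in_dictionary → Spec_find_matching_edges_straight in_dictionary (find_matching_edges_straight in_dictionary)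

-- ===== LEMMAS AND PROOFS =====

-- a Nodup list filtered to one element
theorem pv_filter_beq_nodup {α : Type} [BEq α] [LawfulBEq α]
    (l : List α) (e : α) (h : l.Nodup) :
    l.filter (fun x => x == e) = if e ∈ l then [e] else [] := by
  by_cases hm : e ∈ l
  · simp only [List.filter_beq, if_pos hm, List.count_eq_one_of_mem h hm, List.replicate_one]
  · simp only [List.filter_beq, if_neg hm, List.count_eq_zero_of_not_mem hm, List.replicate_zero]

-- getD after an unconditional modify-append loop
theorem pv_getD_foldl_modify_append {α κ ν : Type} [BEq κ] [LawfulBEq κ] [DecidableEq κ]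
    (l : List α) (key : α → κ) (q : α → List ν) (g : PySem.Dict κ (List ν)) (c : κ) :
    (l.foldl (fun g x => g.modify (key x) [] (· ++ q x)) g).getD c []
      = g.getD c [] ++ (l.filter (fun x => key x == c)).flatMap q := by
  induction l generalizing g with
  | nil => simp
  | cons x t ih =>
    simp only [List.foldl_cons, List.filter_cons]
    rw [ih]
    by_cases h : key x = c
    · simp [h, List.append_assoc]
    · have hne := PySem.Dict.getD_modify_of_ne (k' := c) g [] (fun l => l ++ q x) (fun a => h a.symm)
      simp [h, hne]

-- getD after a guarded modify-append loop
theorem pv_getD_foldl_modify_append_if {α κ ν : Type} [BEq κ] [LawfulBEq κ] [DecidableEq κ]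
    (l : List α) (key : α → κ) (p : α → Prop) [DecidablePred p]
    (q : α → List ν) (g : PySem.Dict κ (List ν)) (c : κ) :
    (l.foldl (fun g x => if p x then g.modify (key x) [] (· ++ q x) else g) g).getD c []
      = g.getD c [] ++ (l.filter (fun x => decide (p x) && (key x == c))).flatMap q := by
  induction l generalizing g with
  | nil => simp
  | cons x t ih =>
    simp only [List.foldl_cons, List.filter_cons]
    by_cases hp : p x
    · rw [if_pos hp, ih]
      by_cases h : key x = c
      · simp [h, hp, List.append_assoc]
      · have hne := PySem.Dict.getD_modify_of_ne (k' := c) g [] (fun l => l ++ q x) (fun a => h a.symm)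
        simp [h, hne, hp]
    · rw [if_neg hp, ih]
      simp [hp]

-- what B's edge-index dictionary contains at an edge
theorem pv_occ_aux (items : List (Int × List String)) (e : String)
    (o : PySem.Dict String (List (Int × Int))) :
    ((items.foldl (fun occ kv =>
        (PySem.List.dedup kv.2).foldl (fun occ edge =>
          occ.modify edge [] (· ++ [(kv.1, pvIndex kv.2 edge)])) occ) o).getD e [])
      = o.getD e [] ++ items.flatMap (fun kv => if e ∈ kv.2 then [(kv.1, pvIndex kv.2 e)] else []) := by
  induction items generalizing o with
  | nil => simp
  | cons kv t ih =>
    simp only [List.foldl_cons, List.flatMap_cons]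
    rw [ih]
    rw [pv_getD_foldl_modify_append (PySem.List.dedup kv.2) (fun ed => ed)
        (fun ed => [(kv.1, pvIndex kv.2 ed)]) o e]
    rw [pv_filter_beq_nodup _ e (PySem.List.nodup_dedup kv.2)]
    by_cases hm : e ∈ kv.2
    · simp [hm, List.append_assoc]
    · simp [hm]

-- flattened edge-index entries carry keys of their items
theorem pv_filter_key_nil (t : List (Int × List String)) (c : Int) (e : String)
    (p : Int → Prop) [DecidablePred p] (hc : c ∉ t.map (·.1)) :
    ((t.flatMap (fun kv' => if e ∈ kv'.2 then [(kv'.1, pvIndex kv'.2 e)] else [])).filter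
        (fun pr => decide (p pr.1) && (pr.1 == c))) = [] := by
  rw [List.filter_eq_nil_iff]
  intro pr hpr
  rw [List.mem_flatMap] at hpr
  obtain ⟨kv', hkv', hmem⟩ := hpr
  have h1 : pr.1 = kv'.1 := by
    by_cases hm : e ∈ kv'.2 <;> simp [hm] at hmem
    rw [hmem]
  have : ¬ pr.1 = c := by
    intro hh
    exact hc (by rw [List.mem_map]; exact ⟨kv', hkv', by rw [← h1, hh]⟩)
  simp [this]

-- looking up one key in the flattened edge index (keys are unique)
theorem pv_flatMap_filter_key (items : List (Int × List String)) (kv1 : Int × List String)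
    (e : String) (p : Int → Prop) [DecidablePred p]
    (hn : (items.map (·.1)).Nodup) (h1 : kv1 ∈ items) :
    ((items.flatMap (fun kv' => if e ∈ kv'.2 then [(kv'.1, pvIndex kv'.2 e)] else [])).filter
        (fun pr => decide (p pr.1) && (pr.1 == kv1.1)))
      = if p kv1.1 ∧ e ∈ kv1.2 then [(kv1.1, pvIndex kv1.2 e)] else [] := by
  induction items with
  | nil => simp at h1
  | cons kv' t ih =>
    simp only [List.flatMap_cons, List.filter_append]
    rw [List.map_cons, List.nodup_cons] at hn
    rcases List.mem_cons.mp h1 with heq | hmem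
    · subst heq
      rw [pv_filter_key_nil t kv1.1 e p hn.1, List.append_nil]
      by_cases hm : e ∈ kv1.2
      · by_cases hp : p kv1.1 <;> simp [hm, hp]
      · simp [hm]
    · have hne : kv'.1 ≠ kv1.1 := by
        intro hh
        exact hn.1 (by rw [hh, List.mem_map]; exact ⟨kv1, hmem, rfl⟩)
      have hhead : (if e ∈ kv'.2 then [(kv'.1, pvIndex kv'.2 e)] else []).filter
          (fun pr => decide (p pr.1) && (pr.1 == kv1.1)) = [] := by
        by_cases hm : e ∈ kv'.2 <;> simp [hm, hne]
      rw [hhead, List.nil_append]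
      exact ih hn.2 hmem

-- Python's "g = d.get(k); if g is None: d[k] = q else: g += q" is Dict.modify
theorem pv_match_modify (d : PySem.Dict Int (List Int)) (k : Int) (q : List Int) :
    (match d.get? k with
     | none => d.insert k q
     | some gl => d.insert k (gl ++ q)) = d.modify k [] (· ++ q) := by
  cases h : d.get? k <;> simp [PySem.Dict.modify, PySem.Dict.getD_eq_get?_getD, h]

-- Python's "g = d.get(k); if g is not None: pairs += g" is an append of d.get(k, [])
theorem pv_match_emit (d : PySem.Dict Int (List Int)) (k : Int) (pairs : List Int) :
    (match d.get? k with
     | none => pairs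
     | some gl => pairs ++ gl) = pairs ++ d.getD k [] := by
  cases h : d.get? k <;> simp [PySem.Dict.getD_eq_get?_getD, h]

-- list * n is n flattened copies
theorem pv_pyRepeat_eq (q : List Int) (r : Int) :
    PySem.List.pyRepeat q r = (List.replicate r.toNat q).flatten := by
  simp [PySem.List.pyRepeat]

-- getD of B's per-key grouping dictionary (runs-level loop, modify form)
theorem pv_groups_aux {α : Type} (occ : PySem.Dict String (List (Int × Int))) (key : Int)
    (ed : α → String) (qe : α → (Int × Int) → List Int) (l : List α)
    (g : PySem.Dict Int (List Int)) (c : Int) :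
    ((l.foldl (fun g x =>
        (occ.getD (ed x) []).foldl (fun g pr =>
          if pr.1 > key then g.modify pr.1 [] (· ++ qe x pr) else g) g) g).getD c [])
      = g.getD c [] ++ l.flatMap (fun x =>
          ((occ.getD (ed x) []).filter (fun pr => decide (pr.1 > key) && (pr.1 == c))).flatMap (qe x)) := by
  induction l generalizing g with
  | nil => simp
  | cons x t ih =>
    simp only [List.foldl_cons, List.flatMap_cons]
    rw [ih]
    rw [pv_getD_foldl_modify_append_if (occ.getD (ed x) []) (fun pr => pr.1)
        (fun pr => pr.1 > key) (qe x) g c]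
    rw [List.append_assoc]

-- the run-length pass, unwound: concatenating each run's repetitions gives back the list
theorem pv_rle_aux (l : List String) (runs : List (String × Int)) (cur : Option String) (cnt : Int)
    (h : 0 ≤ cnt) :
    (pvFlush (l.foldl pvRleStep (runs, cur, cnt))).flatMap (fun p => List.replicate p.2.toNat p.1)
      = runs.flatMap (fun p => List.replicate p.2.toNat p.1)
          ++ List.replicate cnt.toNat (cur.getD "") ++ l := by
  induction l generalizing runs cur cnt with
  | nil =>
    simp only [List.foldl_nil, pvFlush]
    by_cases hc : cnt ≠ 0
    · simp [hc, List.flatMap_append]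
    · push Not at hc
      subst hc
      simp
  | cons e t ih =>
    simp only [List.foldl_cons, pvRleStep]
    by_cases he : cur == some e
    · rw [if_pos he]
      rw [ih runs cur (cnt + 1) (by omega)]
      have hce : cur = some e := by simpa using he
      subst hce
      have hnn : (cnt + 1).toNat = cnt.toNat + 1 := by omega
      simp [hnn, List.replicate_succ']
    · rw [if_neg he]
      by_cases hc : cnt ≠ 0
      · rw [if_pos hc, ih _ _ 1 (by omega)]
        simp [List.flatMap_append]
      · push Not at hc
        subst hc
        have h0 : (if (0:Int) ≠ 0 then runs ++ [((cur).getD "", (0:Int))] else runs) = runs := by simp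
        rw [h0, ih _ _ 1 (by omega)]
        simp

theorem pv_runs_flat (value : List String) :
    (pvRuns value).flatMap (fun p => List.replicate p.2.toNat p.1) = value := by
  simpa [pvRuns] using pv_rle_aux value [] none 0 le_rfl

-- iterate a value list by its runs
theorem pv_flatMap_by_runs (value : List String) (f : String → List Int) :
    value.flatMap f = (pvRuns value).flatMap (fun er => (List.replicate er.2.toNat er.1).flatMap f) := by
  conv_lhs => rw [← pv_runs_flat value]
  exact List.flatMap_assoc

-- the sorted items of a dict still have unique keys
theorem pv_nodup_keys (in_dictionary : List (Int × List String)) :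
    ((pvItems in_dictionary).map (·.1)).Nodup := by
  have h1 : ((PySem.Dict.ofList in_dictionary).items.map (·.1)).Nodup :=
    PySem.Dict.nodup_keys_ofList in_dictionary
  have hp : ((PySem.Dict.ofList in_dictionary).items.map (·.1)).Perm
      ((pvItems in_dictionary).map (·.1)) :=
    (PySem.List.sorted_perm (PySem.Dict.ofList in_dictionary).items (fun p => p.1) false).symm.map _
  exact hp.nodup h1

-- B's grouping loop with the get/insert match is the same loop in Dict.modify form
theorem pv_groups_match_eq_modify (occ : PySem.Dict String (List (Int × Int))) (key : Int)
    (value : List String) (l : List (String × Int)) (g0 : PySem.Dict Int (List Int)) :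
    (l.foldl (fun g er =>
      (occ.getD er.1 []).foldl (fun g pr =>
        if pr.1 > key then
          match g.get? pr.1 with
          | none => g.insert pr.1 (PySem.List.pyRepeat [key, pvIndex value er.1, pr.1, pr.2] er.2)
          | some gl => g.insert pr.1 (gl ++ PySem.List.pyRepeat [key, pvIndex value er.1, pr.1, pr.2] er.2)
        else g) g) g0)
    = l.foldl (fun g er =>
      (occ.getD er.1 []).foldl (fun g pr =>
        if pr.1 > key then
          g.modify pr.1 [] (· ++ PySem.List.pyRepeat [key, pvIndex value er.1, pr.1, pr.2] er.2)
        else g) g) g0 := by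
  have hf : (fun (g : PySem.Dict Int (List Int)) (er : String × Int) =>
      (occ.getD er.1 []).foldl (fun g pr =>
        if pr.1 > key then
          match g.get? pr.1 with
          | none => g.insert pr.1 (PySem.List.pyRepeat [key, pvIndex value er.1, pr.1, pr.2] er.2)
          | some gl => g.insert pr.1 (gl ++ PySem.List.pyRepeat [key, pvIndex value er.1, pr.1, pr.2] er.2)
        else g) g)
      = (fun (g : PySem.Dict Int (List Int)) (er : String × Int) =>
      (occ.getD er.1 []).foldl (fun g pr =>
        if pr.1 > key then
          g.modify pr.1 [] (· ++ PySem.List.pyRepeat [key, pvIndex value er.1, pr.1, pr.2] er.2)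
        else g) g) := by
    funext g er
    have hf2 : (fun (g : PySem.Dict Int (List Int)) (pr : Int × Int) =>
        if pr.1 > key then
          match g.get? pr.1 with
          | none => g.insert pr.1 (PySem.List.pyRepeat [key, pvIndex value er.1, pr.1, pr.2] er.2)
          | some gl => g.insert pr.1 (gl ++ PySem.List.pyRepeat [key, pvIndex value er.1, pr.1, pr.2] er.2)
        else g)
        = (fun (g : PySem.Dict Int (List Int)) (pr : Int × Int) =>
        if pr.1 > key then
          g.modify pr.1 [] (· ++ PySem.List.pyRepeat [key, pvIndex value er.1, pr.1, pr.2] er.2)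
        else g) := by
      funext g pr
      by_cases hp : pr.1 > key
      · rw [if_pos hp, if_pos hp, pv_match_modify]
      · rw [if_neg hp, if_neg hp]
    rw [hf2]
  rw [hf]

-- ===== VERDICT (by name: the statement is the Claim_ definition above) =====
theorem find_matching_edges_straight_spec : Claim_equal_find_matching_edges_straight := by
  intro d _
  unfold Spec_find_matching_edges_straight
  have hn := pv_nodup_keys d
  simp only [find_matching_edges_straight, find_matching_edges_straight_alt]
  refine PySem.List.foldl_congr_mem _ _ _ _ ?_
  intro pairs kv hkv
  refine PySem.List.foldl_congr_mem _ _ _ _ ?_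
  intro acc kv1 hkv1
  by_cases hgt : kv1.1 > kv.1
  · rw [if_pos hgt, if_pos hgt]
    rw [pv_match_emit]
    rw [PySem.List.foldl_congr_mem _ _
      (fun acc e => acc ++ (if kv.1 ≠ kv1.1 ∧ e ∈ kv1.2 then
        [kv.1, pvIndex kv.2 e, kv1.1, pvIndex kv1.2 e] else [])) acc
      (by intro a e he; by_cases h : kv.1 ≠ kv1.1 ∧ e ∈ kv1.2 <;> simp [h])]
    rw [PySem.List.foldl_append_eq_flatMap]
    rw [pv_groups_match_eq_modify]
    rw [pv_groups_aux _ kv.1 (fun er => er.1)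
        (fun er pr => PySem.List.pyRepeat [kv.1, pvIndex kv.2 er.1, pr.1, pr.2] er.2)
        (pvRuns kv.2) PySem.Dict.empty kv1.1]
    simp only [PySem.Dict.getD_empty, List.nil_append]
    congr 1
    rw [pv_flatMap_by_runs kv.2
      (fun e => if kv.1 ≠ kv1.1 ∧ e ∈ kv1.2 then
        [kv.1, pvIndex kv.2 e, kv1.1, pvIndex kv1.2 e] else [])]
    refine List.flatMap_congr ?_
    intro er her
    rw [pv_occ_aux (pvItems d) er.1 PySem.Dict.empty]
    simp only [PySem.Dict.getD_empty, List.nil_append]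
    rw [pv_flatMap_filter_key (pvItems d) kv1 er.1 (fun z => z > kv.1) hn hkv1]
    rw [List.flatMap_replicate]
    by_cases hm : er.1 ∈ kv1.2
    · simp [hm, hgt, ne_of_lt hgt, pv_pyRepeat_eq]
    · simp [hm]
  · rw [if_neg hgt, if_neg hgt]
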